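-- pv_equiv track=rewrite | github.com/anejaP/papvp-izpit | vaje/vaje1_ogrevanje.py | vmesne_vsote
-- ===== SOURCE A (Python) =====
-- def vmesne_vsote(podatki):
--     nov = []
--     vsota = 0
--     if podatki == []:
--         return []
--     for i in range(len(podatki)):
--         if podatki[i] <= 0:
--             vsota = vsota
--             nov.append(vsota)
--         else:
--             vsota += podatki[i]
--             nov.append(vsota)
--     return nov
-- ===== SOURCE B (Python) =====
-- def vmesne_vsote(podatki):
--     n = len(podatki)
--     if n == 0:
--         return []
--     if n == 1:
--         x = podatki[0]
--         return [x if x > 0 else 0]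
--     mid = n // 2
--     left = vmesne_vsote(podatki[:mid])
--     right = vmesne_vsote(podatki[mid:])
--     off = left[-1]
--     return left + [off + r for r in right]
-- ===== Notes on version B (the rewrite author's own statement) =====
-- stated objective: alternative
-- what changed: Replaces A's single fused left-to-right index loop with a divide-and-conquer prefix scan: split the list in half, recursively compute both halves' running sums, then shift the right half's results by the left half's final total.
import Mathlib
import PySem

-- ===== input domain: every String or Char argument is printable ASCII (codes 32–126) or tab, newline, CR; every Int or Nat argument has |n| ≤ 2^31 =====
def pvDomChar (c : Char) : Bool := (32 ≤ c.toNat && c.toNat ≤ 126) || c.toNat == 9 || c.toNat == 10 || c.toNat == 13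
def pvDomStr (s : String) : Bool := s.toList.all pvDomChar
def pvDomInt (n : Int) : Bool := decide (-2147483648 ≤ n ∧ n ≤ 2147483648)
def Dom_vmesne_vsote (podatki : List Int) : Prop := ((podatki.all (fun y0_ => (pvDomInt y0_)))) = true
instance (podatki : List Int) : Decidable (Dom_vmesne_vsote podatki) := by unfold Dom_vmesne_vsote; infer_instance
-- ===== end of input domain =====

-- B replaces A's fused left-to-right index loop with a divide-and-conquer prefix scan
-- (recurse on both halves, then shift the right half by the left half's last value);
-- objective: alternative (no speed claim).

-- ===== PORT A =====
def vmesne_vsote (podatki : List Int) : List Int :=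
  if podatki = [] then []
  else
    ((PySem.List.pyRange 0 (PySem.List.len podatki) 1).foldl
      (fun (st : List Int × Int) i =>
        let x := PySem.List.pyGetD podatki i 0
        if x ≤ 0 then (st.1 ++ [st.2], st.2) else (st.1 ++ [st.2 + x], st.2 + x))
      ([], 0)).1

-- ===== PORT B =====
-- podatki[:mid] / podatki[mid:] are List.take / List.drop (exact: 0 ≤ mid ≤ len);
-- len(podatki) // 2 is Nat division (exact: len ≥ 0); left[-1] is pyGet? at -1 (left is never empty).
def vmesne_vsote_alt (podatki : List Int) : List Int :=
  if podatki.length = 0 then []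
  else if podatki.length = 1 then
    [if (PySem.List.pyGet? podatki 0).getD 0 > 0 then (PySem.List.pyGet? podatki 0).getD 0 else 0]
  else
    let mid := podatki.length / 2
    let left := vmesne_vsote_alt (podatki.take mid)
    let right := vmesne_vsote_alt (podatki.drop mid)
    let off := (PySem.List.pyGet? left (-1)).getD 0
    left ++ right.map (fun r => off + r)
termination_by podatki.length
decreasing_by
  · simp only [List.length_take]; omega
  · simp only [List.length_drop]; omega

-- ===== PRECONDITION & SPEC =====
def Spec_vmesne_vsote (podatki : List Int) (out : List Int) : Prop := out = vmesne_vsote_alt podatki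
instance (podatki : List Int) (out : List Int) : Decidable (Spec_vmesne_vsote podatki out) := by unfold Spec_vmesne_vsote; infer_instance

-- ===== CLAIM (what is proved, stated in full; the proofs are below) =====
def Claim_equal_vmesne_vsote : Prop := ∀ (podatki : List Int), Dom_vmesne_vsote podatki → Spec_vmesne_vsote podatki (vmesne_vsote podatki)

-- ===== LEMMAS AND PROOFS =====

-- proof-side reference function: prefix sums of a list
def pvScan (s : Int) : List Int → List Int
  | [] => []
  | x :: xs => (s + x) :: pvScan (s + x) xs

def pvClamp (x : Int) : Int := if x > 0 then x else 0

theorem pvScan_shift (l : List Int) (s : Int) :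
    pvScan s l = (pvScan 0 l).map (fun r => s + r) := by
  induction l generalizing s with
  | nil => simp [pvScan]
  | cons x t ih =>
    simp only [pvScan, List.map_cons, zero_add, List.cons.injEq, true_and]
    rw [ih (s + x), ih x, List.map_map]
    apply List.map_congr_left
    intro a _; simp [Function.comp]; ring

theorem pvScan_append (l1 l2 : List Int) (s : Int) :
    pvScan s (l1 ++ l2) = pvScan s l1 ++ pvScan (s + l1.sum) l2 := by
  induction l1 generalizing s with
  | nil => simp [pvScan]
  | cons x t ih => simp [pvScan, ih, add_assoc]

theorem pvScan_getLast? (l : List Int) (s : Int) (h : l ≠ []) :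
    (pvScan s l).getLast? = some (s + l.sum) := by
  induction l generalizing s with
  | nil => exact absurd rfl h
  | cons x t ih =>
    cases t with
    | nil => simp [pvScan]
    | cons y u =>
      have hih := ih (s := s + x) (by simp)
      simp only [pvScan] at hih ⊢
      rw [List.getLast?_cons_cons, hih]
      congr 1
      simp [List.sum_cons]; ring

theorem alt_eq_scan (podatki : List Int) :
    vmesne_vsote_alt podatki = pvScan 0 (podatki.map pvClamp) := by
  induction podatki using vmesne_vsote_alt.induct with
  | case1 podatki h => rw [vmesne_vsote_alt]; simp_all [pvScan]
  | case2 podatki h h1 =>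
    rw [vmesne_vsote_alt, if_neg h, if_pos h1]
    cases podatki with
    | nil => simp at h1
    | cons x t =>
      cases t with
      | nil => simp [pvScan, pvClamp, PySem.List.pyGet?, PySem.List.pyIdx?]
      | cons y u => simp at h1
  | case3 podatki h h1 mid ihl ihr =>
    rw [vmesne_vsote_alt, if_neg h, if_neg h1]
    simp only
    rw [ihl, ihr]
    have hlne : (podatki.take (podatki.length / 2)).map pvClamp ≠ [] := by
      intro hc
      have hlen := congrArg List.length hc
      simp only [List.length_map, List.length_take, List.length_nil] at hlen
      omega
    rw [PySem.List.pyGet?_neg_one, pvScan_getLast? _ _ hlne]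
    simp only [Option.getD_some, zero_add]
    conv_rhs => rw [← List.take_append_drop (podatki.length / 2) podatki]
    rw [List.map_append, pvScan_append, zero_add,
        pvScan_shift ((podatki.drop (podatki.length / 2)).map pvClamp)
          (((podatki.take (podatki.length / 2)).map pvClamp).sum)]

theorem pvFold_eq_scan (xs : List Int) (acc : List Int) (s : Int) :
    (xs.foldl
      (fun (st : List Int × Int) x =>
        if x ≤ 0 then (st.1 ++ [st.2], st.2) else (st.1 ++ [st.2 + x], st.2 + x))
      (acc, s)).1 = acc ++ pvScan s (xs.map pvClamp) := by
  induction xs generalizing acc s with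
  | nil => simp [pvScan]
  | cons x t ih =>
    simp only [List.foldl_cons, List.map_cons, pvScan, pvClamp]
    by_cases h : x ≤ 0
    · have hx : ¬ x > 0 := by omega
      simp [h, hx, ih]
    · have hx : x > 0 := by omega
      simp [h, hx, ih]

-- ===== VERDICT (by name: the statement is the Claim_ definition above) =====
theorem vmesne_vsote_spec : Claim_equal_vmesne_vsote := by
  intro podatki _
  unfold Spec_vmesne_vsote vmesne_vsote
  rw [alt_eq_scan]
  by_cases h : podatki = []
  · simp [h, pvScan]
  · rw [if_neg h,
      PySem.List.foldl_pyRange_zero_pyGetD podatki 0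
        (fun (st : List Int × Int) x =>
          if x ≤ 0 then (st.1 ++ [st.2], st.2) else (st.1 ++ [st.2 + x], st.2 + x)) ([], 0),
      pvFold_eq_scan]
    simp
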